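-- pv_equiv track=rewrite | github.com/Qiskit/qiskit | WignerFunctionDriver.py | generate_qasms_for_batch_runs
-- ===== SOURCE A (Python) =====
-- def generate_instructions_for_IBM_to_perfom_correct_rotations_and_mesurements(theta,phi,qubits):
--     returnString=""
--     for i in range(len(theta)):
--         returnString = returnString + 'u3('+theta[i]+',0,'+phi[i]+') q[' + qubits[i]+ '];'
--     for j in range(len(theta)):
--         returnString = returnString + '\nmeasure q['+ qubits[j]+'] -> c['+str(j)+'];'
--     returnString = returnString +'\n'
--     return returnString
--
-- def generate_qasms_for_batch_runs(baseString, qubits, number_output_points, theta):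
--     phi        = [0]*len(qubits)
--     runStrings = [0]*(number_output_points)
--     for phiindex in range(0,number_output_points):
--         for i in range(0,len(qubits)):
--             phi_string  = str(phiindex)+'*2*pi/'+str(number_output_points)
--             phi[i]      = phi_string
--         runStrings[phiindex] = {'qasm': baseString + generate_instructions_for_IBM_to_perfom_correct_rotations_and_mesurements(theta,phi,qubits)}
--     return runStrings
-- ===== SOURCE B (Python) =====
-- def generate_qasms_for_batch_runs(baseString, qubits, number_output_points, theta):
--     # Template algorithm: split each run's qasm at the phi-insertion points once;
--     # every run is then a single join with its phi string as the separator.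
--     segs = []
--     cur = baseString
--     for t, q in zip(theta, qubits):
--         segs.append(cur + 'u3(' + t + ',0,')
--         cur = ') q[' + q + '];'
--     for j, (_, q) in enumerate(zip(theta, qubits)):
--         cur += '\nmeasure q[' + q + '] -> c[' + str(j) + '];'
--     segs.append(cur + '\n')
--     return [{'qasm': (str(k) + '*2*pi/' + str(number_output_points)).join(segs)}
--             for k in range(number_output_points)]
-- ===== Notes on version B (the rewrite author's own statement) =====
-- stated objective: faster
-- what changed: B uses a template algorithm: one setup pass splits the run qasm into phi-independent segments at the phi-insertion points, and each run is produced by a single sep.join(segments) call with the run's phi string as the separator, instead of A's per-run rebuild of the phi list and quadratic += re-concatenation of every fragment.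
import Mathlib
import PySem

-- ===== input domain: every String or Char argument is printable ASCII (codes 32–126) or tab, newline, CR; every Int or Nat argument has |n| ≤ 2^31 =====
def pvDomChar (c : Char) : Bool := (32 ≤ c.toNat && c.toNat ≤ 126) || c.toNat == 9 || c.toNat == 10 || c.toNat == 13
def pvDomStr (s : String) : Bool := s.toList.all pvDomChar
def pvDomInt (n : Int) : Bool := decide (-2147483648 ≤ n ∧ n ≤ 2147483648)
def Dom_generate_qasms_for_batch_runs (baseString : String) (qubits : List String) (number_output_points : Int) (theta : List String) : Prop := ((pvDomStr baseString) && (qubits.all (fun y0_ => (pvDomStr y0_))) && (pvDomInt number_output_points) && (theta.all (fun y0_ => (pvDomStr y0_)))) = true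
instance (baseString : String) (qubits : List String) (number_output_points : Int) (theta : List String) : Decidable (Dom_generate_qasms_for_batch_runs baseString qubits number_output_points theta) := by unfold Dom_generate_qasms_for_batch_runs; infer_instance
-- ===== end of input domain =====

-- B builds the phi-independent segment list once and emits each run as one join with the phi string as separator; no argument is mutated.
-- ===== PORT A =====
-- literal port of generate_instructions_for_IBM_to_perfom_correct_rotations_and_mesurements;
-- list indexing theta[i]/phi[i]/qubits[i] uses getD: Pre_ guarantees every index is in range (Python raises otherwise).
def pvGenInstr (theta : List String) (phi : List String) (qubits : List String) : String :=
  let r1 := (List.range theta.length).foldl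
    (fun acc i => acc ++ ("u3(" ++ theta.getD i "" ++ ",0," ++ phi.getD i "" ++ ") q[" ++ qubits.getD i "" ++ "];")) ""
  let r2 := (List.range theta.length).foldl
    (fun acc j => acc ++ ("\nmeasure q[" ++ qubits.getD j "" ++ "] -> c[" ++ PySem.Int.toStr (j : Int) ++ "];")) r1
  r2 ++ "\n"

def generate_qasms_for_batch_runs (baseString : String) (qubits : List String) (number_output_points : Int) (theta : List String) : List (List (String × String)) :=
  -- phi = [0]*len(qubits): the int placeholders are never read (each phi[i] is overwritten before use inside Pre_)
  -- runStrings[phiindex] = … assigns positions 0..n-1 in order: ported as append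
  (PySem.List.pyRange 0 number_output_points 1).foldl
    (fun runStrings phiindex =>
      let phi := (List.range qubits.length).foldl
        (fun p i => p.set i (PySem.Int.toStr phiindex ++ "*2*pi/" ++ PySem.Int.toStr number_output_points))
        (List.replicate qubits.length "")
      runStrings ++ [[("qasm", baseString ++ pvGenInstr theta phi qubits)]])
    []

-- ===== PORT B =====
def generate_qasms_for_batch_runs_alt (baseString : String) (qubits : List String) (number_output_points : Int) (theta : List String) : List (List (String × String)) :=
  -- setup pass: split the run qasm into phi-independent segments at the phi-insertion points
  let step1 := (theta.zip qubits).foldl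
    (fun (p : List String × String) tq =>
      (p.1 ++ [p.2 ++ "u3(" ++ tq.1 ++ ",0,"], ") q[" ++ tq.2 ++ "];"))
    ([], baseString)
  let cur := (PySem.List.enumerate (theta.zip qubits)).foldl
    (fun c jp => c ++ ("\nmeasure q[" ++ jp.2.2 ++ "] -> c[" ++ PySem.Int.toStr jp.1 ++ "];"))
    step1.2
  let segs := step1.1 ++ [cur ++ "\n"]
  -- each run = sep.join(segs) with the run's phi string as separator (sep.join → PySem.Str.join)
  (PySem.List.pyRange 0 number_output_points 1).map (fun phiindex =>
    [("qasm", PySem.Str.join (PySem.Int.toStr phiindex ++ "*2*pi/" ++ PySem.Int.toStr number_output_points) segs)])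

-- ===== PRECONDITION & SPEC =====
-- Pre_ excludes exactly the inputs on which A raises IndexError: at least one run is generated and
-- theta is longer than qubits, so the helper reads phi[i]/qubits[i] past the end.
def Pre_generate_qasms_for_batch_runs (baseString : String) (qubits : List String) (number_output_points : Int) (theta : List String) : Prop :=
  number_output_points ≤ 0 ∨ theta.length ≤ qubits.length
instance (baseString : String) (qubits : List String) (number_output_points : Int) (theta : List String) : Decidable (Pre_generate_qasms_for_batch_runs baseString qubits number_output_points theta) := by unfold Pre_generate_qasms_for_batch_runs; infer_instance

def pvWitness_generate_qasms_for_batch_runs : String × List String × Int × List String :=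
  ("OPENQASM 2.0;", ["0", "1"], 2, ["pi/2", "pi/2"])

def Spec_generate_qasms_for_batch_runs (baseString : String) (qubits : List String) (number_output_points : Int) (theta : List String) (out : List (List (String × String))) : Prop := out = generate_qasms_for_batch_runs_alt baseString qubits number_output_points theta
instance (baseString : String) (qubits : List String) (number_output_points : Int) (theta : List String) (out : List (List (String × String))) : Decidable (Spec_generate_qasms_for_batch_runs baseString qubits number_output_points theta out) := by unfold Spec_generate_qasms_for_batch_runs; infer_instance

-- ===== CLAIM (what is proved, stated in full; the proofs are below) =====
def Claim_equal_generate_qasms_for_batch_runs : Prop := ∀ (baseString : String) (qubits : List String) (number_output_points : Int) (theta : List String), Dom_generate_qasms_for_batch_runs baseString qubits number_output_points theta → Pre_generate_qasms_for_batch_runs baseString qubits number_output_points theta → Spec_generate_qasms_for_batch_runs baseString qubits number_output_points theta (generate_qasms_for_batch_runs baseString qubits number_output_points theta)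

-- ===== LEMMAS AND PROOFS =====
lemma pv_foldl_join (l : List String) (s : String) :
    l.foldl (· ++ ·) s = s ++ String.join l := by
  induction l generalizing s with
  | nil => simp [String.join]
  | cons x l ih =>
      rw [List.foldl_cons, ih]
      rw [show String.join (x :: l) = List.foldl (· ++ ·) x l from by simp [String.join]]
      rw [ih x, String.append_assoc]

lemma pv_foldl_append_join {α : Type} (l : List α) (g : α → String) (s : String) :
    l.foldl (fun acc x => acc ++ g x) s = s ++ String.join (l.map g) := by
  rw [← List.foldl_map, pv_foldl_join]

lemma pv_join_cons_cons (sep a b : String) (l : List String) :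
    PySem.Str.join sep (a :: b :: l) = a ++ sep ++ PySem.Str.join sep (b :: l) := by
  refine String.toList_inj.mp ?_
  simp [PySem.Str.toList_join, PySem.Chars.join_cons_cons]

lemma pv_join_singleton (sep a : String) : PySem.Str.join sep [a] = a := by
  refine String.toList_inj.mp ?_
  simp [PySem.Str.toList_join, PySem.Chars.join_singleton]

lemma pv_join_cons_of_ne_nil (sep a : String) (l : List String) (h : l ≠ []) :
    PySem.Str.join sep (a :: l) = a ++ sep ++ PySem.Str.join sep l := by
  cases l with
  | nil => exact absurd rfl h
  | cons b r => exact pv_join_cons_cons sep a b r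

-- the shape of B's setup fold: segments and pending tail
def pvSegs : String → List (String × String) → List String
  | _, [] => []
  | cur, tq :: r => (cur ++ "u3(" ++ tq.1 ++ ",0,") :: pvSegs (") q[" ++ tq.2 ++ "];") r

def pvLast : String → List (String × String) → String
  | cur, [] => cur
  | _, tq :: r => pvLast (") q[" ++ tq.2 ++ "];") r

lemma pv_fold_segs (l : List (String × String)) (acc : List String) (cur : String) :
    l.foldl (fun (p : List String × String) tq =>
        (p.1 ++ [p.2 ++ "u3(" ++ tq.1 ++ ",0,"], ") q[" ++ tq.2 ++ "];")) (acc, cur)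
      = (acc ++ pvSegs cur l, pvLast cur l) := by
  induction l generalizing acc cur with
  | nil => simp [pvSegs, pvLast]
  | cons tq r ih => simp [pvSegs, pvLast, ih]

-- joining the segments with sep re-inserts sep at every phi position
lemma pv_join_segs (l : List (String × String)) (sep tail : String) (cur : String) :
    PySem.Str.join sep (pvSegs cur l ++ [pvLast cur l ++ tail])
      = cur ++ String.join (l.map (fun tq => "u3(" ++ tq.1 ++ ",0," ++ sep ++ ") q[" ++ tq.2 ++ "];")) ++ tail := by
  induction l generalizing cur with
  | nil => simp [pvSegs, pvLast, pv_join_singleton, String.join]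
  | cons tq r ih =>
      rw [show pvSegs cur (tq :: r) = (cur ++ "u3(" ++ tq.1 ++ ",0,") :: pvSegs (") q[" ++ tq.2 ++ "];") r from rfl]
      rw [show pvLast cur (tq :: r) = pvLast (") q[" ++ tq.2 ++ "];") r from rfl]
      rw [List.cons_append, pv_join_cons_of_ne_nil _ _ _ (by simp), ih]
      rw [show String.join ((tq :: r).map (fun tq => "u3(" ++ tq.1 ++ ",0," ++ sep ++ ") q[" ++ tq.2 ++ "];"))
            = List.foldl (· ++ ·) ("u3(" ++ tq.1 ++ ",0," ++ sep ++ ") q[" ++ tq.2 ++ "];")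
                (r.map (fun tq => "u3(" ++ tq.1 ++ ",0," ++ sep ++ ") q[" ++ tq.2 ++ "];")) from by simp [String.join]]
      rw [pv_foldl_join]
      simp [String.append_assoc]

-- inside Pre_, A's helper applied to the constant phi list equals the spliced fragment join
lemma pv_instr_eq (th qs : List String) (phis : String) (h : th.length ≤ qs.length) :
    pvGenInstr th (List.replicate qs.length phis) qs
    = String.join ((th.zip qs).map (fun tq => "u3(" ++ tq.1 ++ ",0," ++ phis ++ ") q[" ++ tq.2 ++ "];"))
      ++ String.join ((PySem.List.enumerate (th.zip qs)).map
        (fun jp => "\nmeasure q[" ++ jp.2.2 ++ "] -> c[" ++ PySem.Int.toStr jp.1 ++ "];"))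
      ++ "\n" := by
  unfold pvGenInstr
  simp only [pv_foldl_append_join]
  have hU : (List.range th.length).map
      (fun i => "u3(" ++ th.getD i "" ++ ",0," ++ (List.replicate qs.length phis).getD i "" ++ ") q[" ++ qs.getD i "" ++ "];")
      = (th.zip qs).map (fun tq => "u3(" ++ tq.1 ++ ",0," ++ phis ++ ") q[" ++ tq.2 ++ "];") := by
    apply List.ext_getElem
    · simp [List.length_zip]; omega
    · intro i h1 h2
      simp only [List.length_map, List.length_range] at h1
      have hiq : i < qs.length := by omega
      simp [List.getElem_zip, h1, hiq, List.getElem_replicate, String.append_assoc]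
  have hM : (List.range th.length).map
      (fun j => "\nmeasure q[" ++ qs.getD j "" ++ "] -> c[" ++ PySem.Int.toStr (j : Int) ++ "];")
      = (PySem.List.enumerate (th.zip qs)).map
        (fun jp => "\nmeasure q[" ++ jp.2.2 ++ "] -> c[" ++ PySem.Int.toStr jp.1 ++ "];") := by
    apply List.ext_getElem
    · simp [PySem.List.length_enumerate, List.length_zip]; omega
    · intro i h1 h2
      simp only [List.length_map, List.length_range] at h1
      have hiq : i < qs.length := by omega
      simp [PySem.List.getElem_enumerate, List.getElem_zip, hiq]
  rw [hU, hM]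
  simp [String.append_assoc]

lemma pv_set_replicate (v w : String) (m k : Nat) (h : m ≤ k) :
    (List.range m).foldl (fun p i => p.set i v) (List.replicate k w)
      = List.replicate m v ++ List.replicate (k - m) w := by
  induction m with
  | zero => simp
  | succ m ih =>
      rw [List.range_succ, List.foldl_append, ih (by omega)]
      simp only [List.foldl_cons, List.foldl_nil]
      have hk : k - m = (k - (m+1)) + 1 := by omega
      rw [hk, List.replicate_succ]
      rw [List.set_append_right _ _ (by simp)]
      simp [List.replicate_succ' (n := m), List.set_cons_zero]

-- ===== VERDICT (by name: the statement is the Claim_ definition above) =====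
theorem generate_qasms_for_batch_runs_spec : Claim_equal_generate_qasms_for_batch_runs := by
  intro bs qs n th _ hpre
  unfold Pre_generate_qasms_for_batch_runs at hpre
  unfold Spec_generate_qasms_for_batch_runs generate_qasms_for_batch_runs generate_qasms_for_batch_runs_alt
  rcases hpre with hle | hlen
  · rw [PySem.List.pyRange_one_eq_nil hle]
    simp
  · simp only [PySem.List.foldl_append_singleton_eq_map, List.nil_append, pv_fold_segs,
      pv_foldl_append_join]
    apply List.map_congr_left
    intro p _
    rw [pv_set_replicate _ _ _ _ le_rfl]
    simp only [Nat.sub_self, List.replicate_zero, List.append_nil, List.nil_append]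
    rw [pv_instr_eq _ _ _ hlen]
    rw [show (pvLast bs (th.zip qs) ++ String.join ((PySem.List.enumerate (th.zip qs)).map
          (fun jp => "\nmeasure q[" ++ jp.2.2 ++ "] -> c[" ++ PySem.Int.toStr jp.1 ++ "];"))) ++ "\n"
        = pvLast bs (th.zip qs) ++ (String.join ((PySem.List.enumerate (th.zip qs)).map
          (fun jp => "\nmeasure q[" ++ jp.2.2 ++ "] -> c[" ++ PySem.Int.toStr jp.1 ++ "];")) ++ "\n") from by
      simp [String.append_assoc]]
    rw [pv_join_segs]
    simp [String.append_assoc]
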